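-- pv_equiv track=rewrite | github.com/unswit/COMP9313-20T2 | Project 1 (DONE)/toy2/submission.py | count_collide
-- ===== SOURCE A (Python) =====
-- def count_collide(data_hashes, query_hashes, alpha_m):
--
--     rID, hashes = data_hashes
--
--     # Dictionary to keep track of all diffs
--     offset_dict = {}
--
--     # Calculate and add diff to dictionary
--     for pos in range(len(hashes)):
--         diff = int(abs(hashes[pos] - query_hashes[pos]))
--         if diff in offset_dict:
--             offset_dict[diff] += 1
--         else:
--             offset_dict[diff] = 1
--
--     # Sort by keys
--     offset_list = sorted(offset_dict.keys())
--
--     # Find the minimum offset to be satisfied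
--     count = 0
--     for x in offset_list:
--         count += offset_dict[x]
--         if count >= alpha_m:
--             return (rID, x)
--
--     # Return rID withs its minimum offset
--     return (rID, offset_dict[-1])
-- ===== SOURCE B (Python) =====
-- def count_collide(data_hashes, query_hashes, alpha_m):
--     rID, hashes = data_hashes
--     diffs = sorted(abs(h - q) for h, q in zip(hashes, query_hashes))
--     k = alpha_m if alpha_m > 1 else 1
--     return (rID, diffs[k - 1])
-- ===== Notes on version B (the rewrite author's own statement) =====
-- stated objective: simpler
-- what changed: Replaces the diff-frequency dictionary plus sorted-keys cumulative scan by a direct order statistic: sort the diff list once and index its max(alpha_m,1)-th smallest element.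
import Mathlib
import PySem

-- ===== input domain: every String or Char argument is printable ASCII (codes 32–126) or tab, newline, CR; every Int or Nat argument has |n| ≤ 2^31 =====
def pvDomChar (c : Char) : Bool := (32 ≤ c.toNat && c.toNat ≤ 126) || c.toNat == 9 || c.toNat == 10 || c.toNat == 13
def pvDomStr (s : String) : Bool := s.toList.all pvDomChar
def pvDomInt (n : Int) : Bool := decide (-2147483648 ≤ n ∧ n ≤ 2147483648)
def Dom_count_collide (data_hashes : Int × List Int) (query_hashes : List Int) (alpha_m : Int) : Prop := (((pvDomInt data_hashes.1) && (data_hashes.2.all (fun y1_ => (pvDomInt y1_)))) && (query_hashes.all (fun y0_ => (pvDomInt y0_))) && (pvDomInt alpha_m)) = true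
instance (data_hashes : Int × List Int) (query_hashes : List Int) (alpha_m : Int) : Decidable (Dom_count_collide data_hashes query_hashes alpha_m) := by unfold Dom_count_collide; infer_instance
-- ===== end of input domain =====

-- B replaces A's diff-frequency dictionary + sorted-keys cumulative scan by sorting the diff
-- list once and indexing its max(alpha_m,1)-th smallest element (objective: simpler).

-- ===== PORT A =====
-- A's second loop: walk the sorted keys accumulating counts; none = the loop fell through.
def pvScanA (d : PySem.Dict Int Int) (alpha_m : Int) : List Int → Int → Option Int
  | [], _ => none
  | x :: rest, count =>
      let count' := count + (d.get? x).getD 0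
      if alpha_m ≤ count' then some x else pvScanA d alpha_m rest count'

def count_collide (data_hashes : Int × List Int) (query_hashes : List Int) (alpha_m : Int) : Int × Int :=
  let rID := data_hashes.1
  let hashes := data_hashes.2
  -- first loop: hashes[pos]/query_hashes[pos] raise IndexError out of range (excluded by Pre_)
  let offset_dict := (PySem.List.pyRange 0 (hashes.length : Int) 1).foldl
    (fun d pos =>
      let diff := |PySem.List.pyGetD hashes pos 0 - PySem.List.pyGetD query_hashes pos 0|
      if d.contains diff then d.insert diff ((d.get? diff).getD 0 + 1) else d.insert diff 1)
    PySem.Dict.empty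
  let offset_list := PySem.List.sorted offset_dict.keys (fun x => x) false
  match pvScanA offset_dict alpha_m offset_list 0 with
  | some x => (rID, x)
  | none => (rID, (offset_dict.get? (-1)).getD 0)   -- Python: KeyError here (excluded by Pre_)

-- ===== PORT B =====
def count_collide_alt (data_hashes : Int × List Int) (query_hashes : List Int) (alpha_m : Int) : Int × Int :=
  let rID := data_hashes.1
  let diffs := PySem.List.sorted (List.zipWith (fun h q => |h - q|) data_hashes.2 query_hashes) (fun x => x) false
  let k := if 1 < alpha_m then alpha_m else 1
  (rID, PySem.List.pyGetD diffs (k - 1) 0)   -- diffs[k-1]; in range under Pre_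

-- ===== PRECONDITION & SPEC =====
-- Pre_ excludes exactly the inputs on which Python A raises: IndexError when query_hashes is
-- shorter than the hash list, and KeyError (offset_dict[-1]) when the hash list is empty or
-- alpha_m exceeds its length (the cumulative count can then never reach alpha_m).
def Pre_count_collide (data_hashes : Int × List Int) (query_hashes : List Int) (alpha_m : Int) : Prop :=
  data_hashes.2 ≠ [] ∧ data_hashes.2.length ≤ query_hashes.length ∧ alpha_m ≤ (data_hashes.2.length : Int)
instance (data_hashes : Int × List Int) (query_hashes : List Int) (alpha_m : Int) : Decidable (Pre_count_collide data_hashes query_hashes alpha_m) := by unfold Pre_count_collide; infer_instance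
def pvWitness_count_collide : (Int × List Int) × List Int × Int := ((7, [1, 5]), [2, 2], 2)

def Spec_count_collide (data_hashes : Int × List Int) (query_hashes : List Int) (alpha_m : Int) (out : Int × Int) : Prop := out = count_collide_alt data_hashes query_hashes alpha_m
instance (data_hashes : Int × List Int) (query_hashes : List Int) (alpha_m : Int) (out : Int × Int) : Decidable (Spec_count_collide data_hashes query_hashes alpha_m out) := by unfold Spec_count_collide; infer_instance

-- ===== CLAIM (what is proved, stated in full; the proofs are below) =====
def Claim_equal_count_collide : Prop := ∀ (data_hashes : Int × List Int) (query_hashes : List Int) (alpha_m : Int), Dom_count_collide data_hashes query_hashes alpha_m → Pre_count_collide data_hashes query_hashes alpha_m → Spec_count_collide data_hashes query_hashes alpha_m (count_collide data_hashes query_hashes alpha_m)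

-- ===== LEMMAS AND PROOFS =====

-- A's dict-building loop builds exactly the multiset counter of the diff list.
lemma pvFold_eq_counter (hs qs : List Int) (hlen : hs.length ≤ qs.length) :
    (PySem.List.pyRange 0 (hs.length : Int) 1).foldl
      (fun d pos =>
        let diff := |PySem.List.pyGetD hs pos 0 - PySem.List.pyGetD qs pos 0|
        if d.contains diff then d.insert diff ((d.get? diff).getD 0 + 1) else d.insert diff 1)
      PySem.Dict.empty
    = PySem.Dict.counter (List.zipWith (fun h q => |h - q|) hs qs) := by
  have hmap : (PySem.List.pyRange 0 (hs.length : Int) 1).map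
      (fun pos => |PySem.List.pyGetD hs pos 0 - PySem.List.pyGetD qs pos 0|)
      = List.zipWith (fun h q => |h - q|) hs qs := by
    apply List.ext_getElem
    · simp [PySem.List.length_pyRange_one, List.length_zipWith]; omega
    · intro k hk1 hk2
      have hk : k < hs.length := by
        simpa [PySem.List.length_pyRange_one] using hk1
      have hr : (PySem.List.pyRange 0 (hs.length : Int) 1)[k]'(by simpa [PySem.List.length_pyRange_one] using hk1) = (k : Int) := by
        rw [PySem.List.getElem_pyRange_one]; ring
      simp only [List.getElem_map, hr]
      rw [PySem.List.pyGetD_natCast, PySem.List.pyGetD_natCast,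
          List.getD_eq_getElem _ _ hk, List.getD_eq_getElem _ _ (lt_of_lt_of_le hk hlen)]
      simp [List.getElem_zipWith]
  have hstep : ∀ (d : PySem.Dict Int Int) (x : Int),
      (if d.contains x then d.insert x ((d.get? x).getD 0 + 1) else d.insert x 1)
        = d.modify x 0 (· + 1) := by
    intro d x
    by_cases h : d.contains x
    · simp only [h, if_true]; rfl
    · simp only [h, Bool.false_eq_true, if_false]
      have : (d.get? x) = none := (PySem.Dict.get?_eq_none_iff_contains d x).mpr (by simpa using h)
      show d.insert x 1 = d.insert x ((d.get? x).getD 0 + 1)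
      rw [this]
      norm_num
  calc (PySem.List.pyRange 0 (hs.length : Int) 1).foldl
        (fun d pos =>
          let diff := |PySem.List.pyGetD hs pos 0 - PySem.List.pyGetD qs pos 0|
          if d.contains diff then d.insert diff ((d.get? diff).getD 0 + 1) else d.insert diff 1)
        PySem.Dict.empty
      = ((PySem.List.pyRange 0 (hs.length : Int) 1).map
          (fun pos => |PySem.List.pyGetD hs pos 0 - PySem.List.pyGetD qs pos 0|)).foldl
          (fun d x => if d.contains x then d.insert x ((d.get? x).getD 0 + 1) else d.insert x 1)
          PySem.Dict.empty := by rw [List.foldl_map]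
    _ = (List.zipWith (fun h q => |h - q|) hs qs).foldl
          (fun d x => d.modify x 0 (· + 1)) (PySem.Dict.empty : PySem.Dict Int Int) := by
          rw [hmap]; exact PySem.List.foldl_congr_mem _ _ _ _ (fun d x _ => hstep d x)
    _ = PySem.Dict.counter (List.zipWith (fun h q => |h - q|) hs qs) :=
          (PySem.Dict.counter_eq_foldl _).symm

-- counting elements ≤ x splits into those < x and those = x
lemma pvCountP_le_split (ds : List Int) (x : Int) :
    ds.countP (fun v => decide (v ≤ x))
      = ds.countP (fun v => decide (v < x)) + ds.count x := by
  induction ds with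
  | nil => simp
  | cons a t ih =>
      simp only [List.countP_cons, List.count_cons, ih, decide_eq_true_eq, beq_iff_eq]
      split_ifs <;> omega

-- in a ≤-sorted list, a downward-closed predicate holding at index j forces > j matches
lemma pvAux_lt_countP (p : Int → Bool) (hp : ∀ u v : Int, u ≤ v → p v → p u) :
    ∀ (s : List Int), s.Pairwise (· ≤ ·) → ∀ (j : Nat) (hj : j < s.length),
      p (s[j]'hj) → j < s.countP p := by
  intro s
  induction s with
  | nil => intro _ j hj; simp at hj
  | cons v t ih =>
      intro hpw j hj hpj
      have hv : ∀ y ∈ t, v ≤ y := fun y hy => (List.pairwise_cons.mp hpw).1 y hy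
      have ht : t.Pairwise (· ≤ ·) := (List.pairwise_cons.mp hpw).2
      cases j with
      | zero =>
          have : p v := hpj
          simp [this]
      | succ m =>
          have hm : m < t.length := by simpa using hj
          have hpm : p (t[m]'hm) := hpj
          have := ih ht m hm hpm
          have hpv : p v := hp v (t[m]'hm) (hv _ (List.getElem_mem hm)) hpm
          simp [hpv]; omega

-- … and failing at index j caps the number of matches at j
lemma pvAux_countP_le (p : Int → Bool) (hp : ∀ u v : Int, u ≤ v → p v → p u) :
    ∀ (s : List Int), s.Pairwise (· ≤ ·) → ∀ (j : Nat) (hj : j < s.length),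
      ¬ p (s[j]'hj) → s.countP p ≤ j := by
  intro s
  induction s with
  | nil => intro _ j hj; simp at hj
  | cons v t ih =>
      intro hpw j hj hpj
      have hv : ∀ y ∈ t, v ≤ y := fun y hy => (List.pairwise_cons.mp hpw).1 y hy
      have ht : t.Pairwise (· ≤ ·) := (List.pairwise_cons.mp hpw).2
      cases j with
      | zero =>
          have hnv : ¬ p v := hpj
          have : ∀ y ∈ (v :: t), ¬ p y := by
            intro y hy
            rcases List.mem_cons.mp hy with rfl | hy'
            · exact hnv
            · exact fun hpy => hnv (hp v y (hv y hy') hpy)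
          simp [List.countP_eq_zero.mpr this]
      | succ m =>
          have hm : m < t.length := by simpa using hj
          have hpm : ¬ p (t[m]'hm) := hpj
          have := ih ht m hm hpm
          simp only [List.countP_cons]
          split <;> omega

-- order statistic: the j-th entry of a sorted list is pinned by the two counts around it
lemma pvOrderStat (s : List Int) (hs : s.Pairwise (· ≤ ·)) (x : Int) (j : Nat) (hj : j < s.length)
    (h1 : s.countP (fun v => decide (v < x)) ≤ j)
    (h2 : j < s.countP (fun v => decide (v ≤ x))) : s[j]'hj = x := by
  have hple : ∀ u v : Int, u ≤ v → decide (v ≤ x) = true → decide (u ≤ x) = true := by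
    intro u v huv h; simp at h ⊢; omega
  have hplt : ∀ u v : Int, u ≤ v → decide (v < x) = true → decide (u < x) = true := by
    intro u v huv h; simp at h ⊢; omega
  have hle : s[j]'hj ≤ x := by
    by_contra hcon
    exact absurd (pvAux_countP_le _ hple s hs j hj (by simpa using hcon)) (by omega)
  have hnlt : ¬ (s[j]'hj < x) := by
    intro hcon
    exact absurd (pvAux_lt_countP _ hplt s hs j hj (by simpa using hcon)) (by omega)
  omega

-- the scan over the strictly-increasing covering key list returns the alpha-th smallest diff
lemma pvScanA_spec (ds : List Int) (a : Int) (ha1 : 1 ≤ a) (han : a ≤ (ds.length : Int)) :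
    ∀ (ks : List Int) (c : Int),
      ks.Pairwise (· < ·) →
      (∀ x ∈ ks, x ∈ ds) →
      (∀ v ∈ ds, v ∈ ks ∨ (∀ y ∈ ks, v < y)) →
      c = (ds.countP (fun v => !ks.contains v) : Int) →
      c < a →
      pvScanA (PySem.Dict.counter ds) a ks c =
        some (PySem.List.pyGetD (PySem.List.sorted ds (fun x => x) false) (a - 1) 0) := by
  intro ks
  induction ks with
  | nil =>
      intro c _ _ _ hc hlt
      exfalso
      have : ds.countP (fun v => !List.contains [] v) = ds.length := by
        simp
      rw [this] at hc; omega
  | cons x rest ih =>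
      intro c hinc hmem hcov hc hlt
      have hxrest : ∀ y ∈ rest, x < y := fun y hy => (List.pairwise_cons.mp hinc).1 y hy
      have hrestinc : rest.Pairwise (· < ·) := (List.pairwise_cons.mp hinc).2
      -- the dict entry at x is ds.count x
      have hentry : ((PySem.Dict.counter ds).get? x).getD 0 = (ds.count x : Int) :=
        PySem.Dict.getD_counter ds x
      -- c counts the diffs < x, c + count x counts the diffs ≤ x
      have hcongr1 : ∀ v ∈ ds, (!List.contains (x :: rest) v) = decide (v < x) := by
        intro v hv
        rcases hcov v hv with hvk | hvlt
        · rcases List.mem_cons.mp hvk with rfl | hvr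
          · simp
          · have := hxrest v hvr
            simp [List.contains_eq_mem, hvr]; omega
        · have h1 := hvlt x (List.mem_cons_self)
          have h2 : v ∉ rest := fun hr => absurd (hxrest v hr) (by omega)
          simp [List.contains_eq_mem, h1, h2]; omega
      have hcongr2 : ∀ v ∈ ds, (!List.contains rest v) = decide (v ≤ x) := by
        intro v hv
        by_cases hvr : v ∈ rest
        · have := hxrest v hvr
          simp [List.contains_eq_mem, hvr]; omega
        · rcases hcov v hv with hvk | hvlt
          · rcases List.mem_cons.mp hvk with rfl | h
            · simp [List.contains_eq_mem, hvr]
            · exact absurd h hvr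
          · have := hvlt x (List.mem_cons_self)
            simp [List.contains_eq_mem, hvr]; omega
      have hclt : c = (ds.countP (fun v => decide (v < x)) : Int) := by
        rw [hc, List.countP_congr (by intro v hv; rw [hcongr1 v hv])]
      have hcle : c + (ds.count x : Int) = (ds.countP (fun v => decide (v ≤ x)) : Int) := by
        rw [pvCountP_le_split ds x, hclt]; push_cast; ring
      -- sorted facts
      set s := PySem.List.sorted ds (fun x => x) false with hsdef
      have hsperm : s.Perm ds := PySem.List.sorted_perm ds _ _
      have hspw : s.Pairwise (· ≤ ·) := PySem.List.sorted_pairwise ds _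
      have hslen : s.length = ds.length := hsperm.length_eq
      have hcount_lt : s.countP (fun v => decide (v < x)) = ds.countP (fun v => decide (v < x)) :=
        hsperm.countP_eq _
      have hcount_le : s.countP (fun v => decide (v ≤ x)) = ds.countP (fun v => decide (v ≤ x)) :=
        hsperm.countP_eq _
      show pvScanA (PySem.Dict.counter ds) a (x :: rest) c = _
      rw [pvScanA]
      simp only [hentry]
      by_cases hstop : a ≤ c + (ds.count x : Int)
      · rw [if_pos hstop]
        have hj : ((a - 1).toNat) < s.length := by rw [hslen]; omega
        have : s[(a-1).toNat]'hj = x := by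
          apply pvOrderStat s hspw x _ hj
          · rw [hcount_lt]; omega
          · rw [hcount_le]; omega
        rw [PySem.List.pyGetD_eq_getElem _ _ (by omega) (by rw [hslen]; omega), this]
      · rw [if_neg hstop]
        apply ih (c + (ds.count x : Int)) hrestinc
            (fun y hy => hmem y (List.mem_cons_of_mem x hy))
        · intro v hv
          rcases hcov v hv with hvk | hvlt
          · rcases List.mem_cons.mp hvk with rfl | h
            · exact Or.inr (fun y hy => hxrest y hy)
            · exact Or.inl h
          · exact Or.inr (fun y hy => hvlt y (List.mem_cons_of_mem x hy))
        · have hcg : ds.countP (fun v => !rest.contains v) = ds.countP (fun v => decide (v ≤ x)) :=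
            List.countP_congr (fun v hv => by rw [hcongr2 v hv])
          rw [hcg]; exact hcle
        · omega

-- ===== VERDICT (by name: the statement is the Claim_ definition above) =====
theorem count_collide_spec : Claim_equal_count_collide := by
  intro dh qs a _ hpre
  obtain ⟨hne, hlen, ham⟩ := hpre
  unfold Spec_count_collide count_collide count_collide_alt
  obtain ⟨rID, hs⟩ := dh
  simp only at hne hlen ham ⊢
  set ds := List.zipWith (fun h q => |h - q|) hs qs with hdsdef
  have hdslen : ds.length = hs.length := by
    rw [hdsdef, List.length_zipWith]; omega
  rw [pvFold_eq_counter hs qs hlen, PySem.Dict.keys_counter]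
  set ks := PySem.List.sorted (PySem.Set.ofList ds) (fun x => x) false with hksdef
  have hinc : ks.Pairwise (· < ·) := PySem.List.sorted_ofList_pairwise_lt ds
  have hksmem : ∀ x, x ∈ ks ↔ x ∈ ds := by
    intro x
    rw [hksdef, PySem.List.mem_sorted, PySem.Set.mem_ofList]
  have hdsne : ds ≠ [] := by
    intro h
    apply hne
    cases hs with
    | nil => rfl
    | cons h0 t =>
        cases qs with
        | nil => simp at hlen
        | cons q0 tq => simp [hdsdef] at h
  by_cases ha1 : 1 ≤ a
  · -- k = a; A's scan finds the a-th smallest diff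
    have hscan := pvScanA_spec ds a ha1 (by omega) ks 0 hinc
      (fun x hx => (hksmem x).mp hx)
      (fun v hv => Or.inl ((hksmem v).mpr hv))
      (by
        have : ds.countP (fun v => !ks.contains v) = 0 := by
          apply List.countP_eq_zero.mpr
          intro v hv
          simp [List.contains_eq_mem, (hksmem v).mpr hv]
        rw [this]; simp)
      (by omega)
    rw [hscan]
    by_cases hk : 1 < a
    · simp [hk]
    · have : a = 1 := by omega
      simp [this]
  · -- a ≤ 0: the scan stops at the very first (smallest) key; B picks diffs[0]
    have hksne : ks ≠ [] := by
      intro h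
      rw [hksdef] at h
      have := (PySem.List.sorted_eq_nil_iff _ _ _).mp h
      obtain ⟨v, hv⟩ := List.exists_mem_of_ne_nil ds hdsne
      exact (List.ne_nil_of_mem ((PySem.Set.mem_ofList ds v).mpr hv)) this
    obtain ⟨x, rest, hkseq⟩ := List.exists_cons_of_ne_nil hksne
    have hxds : x ∈ ds := (hksmem x).mp (hkseq ▸ List.mem_cons_self)
    have hcountx : 0 < ds.count x := List.count_pos_iff.mpr hxds
    have hxrest : ∀ y ∈ rest, x < y := by
      intro y hy
      have := hinc
      rw [hkseq] at this
      exact (List.pairwise_cons.mp this).1 y hy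
    rw [hkseq, pvScanA]
    have hentry : ((PySem.Dict.counter ds).get? x).getD 0 = (ds.count x : Int) :=
      PySem.Dict.getD_counter ds x
    rw [show (0 : Int) + ((PySem.Dict.counter ds).get? x).getD 0
          = (0 : Int) + (ds.count x : Int) from by rw [hentry]]
    rw [if_pos (by omega)]
    -- B: k = 1, index 0
    rw [if_neg (by omega)]
    set s := PySem.List.sorted ds (fun x => x) false with hsdef
    have hsperm : s.Perm ds := PySem.List.sorted_perm ds _ _
    have hslen : s.length = ds.length := hsperm.length_eq
    have hj0 : 0 < s.length := by
      rw [hslen]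
      exact List.length_pos_iff.mpr hdsne
    have hs0 : s[0]'hj0 = x := by
      apply pvOrderStat s (PySem.List.sorted_pairwise ds _) x 0 hj0
      · have : ds.countP (fun v => decide (v < x)) = 0 := by
          apply List.countP_eq_zero.mpr
          intro v hv
          have hvks : v ∈ x :: rest := hkseq ▸ (hksmem v).mpr hv
          rcases List.mem_cons.mp hvks with rfl | hr
          · simp
          · have := hxrest v hr; simp; omega
        rw [hsperm.countP_eq, this]
      · rw [hsperm.countP_eq]
        apply List.countP_pos_iff.mpr
        exact ⟨x, hxds, by simp⟩
    have : (1 : Int) - 1 = 0 := by ring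
    rw [this, PySem.List.pyGetD_eq_getElem _ _ (by omega) (by exact_mod_cast hj0)]
    exact congrArg _ hs0.symm
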